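-- pv_equiv track=rewrite | github.com/Mukti-J/Encryption-Algorithm | Bacon's Cipher/BaconsCipherGUI.py | bacons_cipher_decrypt
-- ===== SOURCE A (Python) =====
-- def bacons_cipher_decrypt(ciphertext):
--     bacon_dict = {
--         'AAAAA': 'A', 'AAAAB': 'B', 'AAABA': 'C', 'AAABB': 'D', 'AABAA': 'E',
--         'AABAB': 'F', 'AABBA': 'G', 'AABBB': 'H', 'ABAAA': 'I', 'ABAAB': 'J',
--         'ABABA': 'K', 'ABABB': 'L', 'ABBAA': 'M', 'ABBAB': 'N', 'ABBBA': 'O',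
--         'ABBBB': 'P', 'BAAAA': 'Q', 'BAAAB': 'R', 'BAABA': 'S', 'BAABB': 'T',
--         'BABAA': 'U', 'BABAB': 'V', 'BABBA': 'W', 'BABBB': 'X', 'BBAAA': 'Y', 'BBAAB': 'Z',
--         'BBABB': ' '
--     }
--     tokens = ciphertext.strip().split()
--     result = ''
--     for token in tokens:
--         result += bacon_dict.get(token, '?')
--     return result
-- ===== SOURCE B (Python) =====
-- def bacons_cipher_decrypt(ciphertext):
--     pieces = []
--     for token in ciphertext.split():
--         if len(token) == 5 and all(c in 'AB' for c in token):
--             n = 0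
--             for c in token:
--                 n = 2 * n + (c == 'B')
--             if n <= 25:
--                 pieces.append(chr(65 + n))
--             elif n == 27:
--                 pieces.append(' ')
--             else:
--                 pieces.append('?')
--         else:
--             pieces.append('?')
--     return ''.join(pieces)
-- ===== Notes on version B (the rewrite author's own statement) =====
-- stated objective: alternative
-- what changed: Replaces the 27-entry lookup table with an arithmetic decode: each 5-char A/B token is read as a binary number n (A=0, B=1) and mapped to chr(65+n) for n<=25, space for n=27, '?' otherwise; and the redundant strip() before split() is dropped.
import Mathlib
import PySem

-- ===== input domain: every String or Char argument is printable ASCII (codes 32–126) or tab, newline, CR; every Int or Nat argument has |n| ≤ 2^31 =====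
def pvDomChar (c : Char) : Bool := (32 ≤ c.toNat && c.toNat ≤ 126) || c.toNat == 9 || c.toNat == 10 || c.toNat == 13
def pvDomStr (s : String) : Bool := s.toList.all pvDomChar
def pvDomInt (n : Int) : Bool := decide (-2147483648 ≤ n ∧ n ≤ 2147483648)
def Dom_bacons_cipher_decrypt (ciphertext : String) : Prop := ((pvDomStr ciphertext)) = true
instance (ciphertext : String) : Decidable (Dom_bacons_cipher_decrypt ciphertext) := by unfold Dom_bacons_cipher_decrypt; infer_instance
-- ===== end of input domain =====

-- B replaces A's 27-entry lookup table with an arithmetic binary decode of each token (alternative, same cost).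

-- ===== PORT A =====
-- the literal dict from A's source (insertion order kept)
def baconPairs : List (String × String) :=
  [("AAAAA", "A"), ("AAAAB", "B"), ("AAABA", "C"), ("AAABB", "D"), ("AABAA", "E"),
   ("AABAB", "F"), ("AABBA", "G"), ("AABBB", "H"), ("ABAAA", "I"), ("ABAAB", "J"),
   ("ABABA", "K"), ("ABABB", "L"), ("ABBAA", "M"), ("ABBAB", "N"), ("ABBBA", "O"),
   ("ABBBB", "P"), ("BAAAA", "Q"), ("BAAAB", "R"), ("BAABA", "S"), ("BAABB", "T"),
   ("BABAA", "U"), ("BABAB", "V"), ("BABBA", "W"), ("BABBB", "X"), ("BBAAA", "Y"), ("BBAAB", "Z"),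
   ("BBABB", " ")]

def bacons_cipher_decrypt (ciphertext : String) : String :=
  let bacon_dict : PySem.Dict String String := PySem.Dict.ofList baconPairs
  let tokens := PySem.Str.split₀ (PySem.Str.strip ciphertext)
  -- result += bacon_dict.get(token, '?')  — string concatenation carried as List Char
  String.ofList (tokens.foldl (fun result token => result ++ (bacon_dict.getD token "?").toList) [])

-- ===== PORT B =====
-- one token of B: 5 chars over {A,B} read as binary (A=0, B=1); n≤25 ↦ chr(65+n), n=27 ↦ ' ', else '?'
def baconDecodeTok (cs : List Char) : List Char :=
  if cs.length = 5 ∧ cs.all (fun c => c = 'A' || c = 'B') = true then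
    let n : Nat := cs.foldl (fun n c => 2 * n + (if c = 'B' then 1 else 0)) 0
    if n ≤ 25 then [Char.ofNat (65 + n)]
    else if n = 27 then [' ']
    else ['?']
  else ['?']

def bacons_cipher_decrypt_alt (ciphertext : String) : String :=
  String.ofList (((PySem.Str.split₀ ciphertext).map String.toList).foldl
    (fun pieces cs => pieces ++ baconDecodeTok cs) [])

-- ===== PRECONDITION & SPEC =====
def Spec_bacons_cipher_decrypt (ciphertext : String) (out : String) : Prop := out = bacons_cipher_decrypt_alt ciphertext
instance (ciphertext : String) (out : String) : Decidable (Spec_bacons_cipher_decrypt ciphertext out) := by unfold Spec_bacons_cipher_decrypt; infer_instance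

-- ===== CLAIM (what is proved, stated in full; the proofs are below) =====
def Claim_equal_bacons_cipher_decrypt : Prop := ∀ (ciphertext : String), Dom_bacons_cipher_decrypt ciphertext → Spec_bacons_cipher_decrypt ciphertext (bacons_cipher_decrypt ciphertext)

-- ===== LEMMAS AND PROOFS =====

-- split() ignores leading whitespace
lemma go_dropWhile (s : List Char) (acc : List (List Char)) :
    PySem.Chars.split₀.go (s.dropWhile PySem.Chars.isspace) [] acc = PySem.Chars.split₀.go s [] acc := by
  induction s with
  | nil => rfl
  | cons c rest ih =>
    by_cases hc : PySem.Chars.isspace c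
    · rw [List.dropWhile_cons_of_pos hc, ih]
      conv_rhs => rw [PySem.Chars.split₀.go.eq_def]
      simp [hc]
    · rw [List.dropWhile_cons_of_neg (by simpa using hc)]

-- split() on an all-whitespace remainder just finalizes
lemma go_allspace (w : List Char) (hw : ∀ c ∈ w, PySem.Chars.isspace c = true) (cur : List Char)
    (acc : List (List Char)) :
    PySem.Chars.split₀.go w cur acc = PySem.Chars.split₀.go [] cur acc := by
  induction w generalizing cur acc with
  | nil => rfl
  | cons c rest ih =>
    have hc : PySem.Chars.isspace c = true := hw c (by simp)
    have hw' : ∀ c ∈ rest, PySem.Chars.isspace c = true := fun c hcm => hw c (by simp [hcm])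
    rw [PySem.Chars.split₀.go.eq_def]
    simp only [hc, if_true]
    by_cases hcur : cur.isEmpty
    · rw [if_pos hcur, ih hw' [] acc, PySem.Chars.split₀.go.eq_def,
        PySem.Chars.split₀.go.eq_def]
      simp [hcur]
    · rw [if_neg hcur, ih hw' [] (cur.reverse :: acc), PySem.Chars.split₀.go.eq_def,
        PySem.Chars.split₀.go.eq_def]
      simp [hcur]

-- trailing whitespace never changes split()
lemma go_append_space (t w : List Char) (hw : ∀ c ∈ w, PySem.Chars.isspace c = true)
    (cur : List Char) (acc : List (List Char)) :
    PySem.Chars.split₀.go (t ++ w) cur acc = PySem.Chars.split₀.go t cur acc := by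
  induction t generalizing cur acc with
  | nil => simpa using go_allspace w hw cur acc
  | cons c rest ih =>
    rw [List.cons_append, PySem.Chars.split₀.go.eq_def]
    conv_rhs => rw [PySem.Chars.split₀.go.eq_def]
    by_cases hc : PySem.Chars.isspace c <;> by_cases hcur : cur.isEmpty <;>
      simp only [hc, hcur, if_true, if_false, Bool.false_eq_true] <;>
      first
        | exact ih [] acc
        | exact ih [] (cur.reverse :: acc)
        | exact ih (c :: cur) acc

-- .strip() before .split() is redundant
lemma split₀_strip (cs : List Char) :
    PySem.Chars.split₀ (PySem.Chars.strip cs) = PySem.Chars.split₀ cs := by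
  have hu : PySem.Chars.lstrip cs =
      PySem.Chars.rstrip (PySem.Chars.lstrip cs) ++
        (List.takeWhile PySem.Chars.isspace (PySem.Chars.lstrip cs).reverse).reverse := by
    rw [PySem.Chars.rstrip]
    conv_rhs => rw [← List.reverse_append, List.takeWhile_append_dropWhile, List.reverse_reverse]
  have hw : ∀ c ∈ (List.takeWhile PySem.Chars.isspace (PySem.Chars.lstrip cs).reverse).reverse,
      PySem.Chars.isspace c = true := by
    intro c hcm
    exact List.mem_takeWhile_imp (List.mem_reverse.mp hcm)
  show PySem.Chars.split₀.go (PySem.Chars.strip cs) [] [] = PySem.Chars.split₀.go cs [] []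
  calc PySem.Chars.split₀.go (PySem.Chars.strip cs) [] []
      = PySem.Chars.split₀.go (PySem.Chars.rstrip (PySem.Chars.lstrip cs) ++
          (List.takeWhile PySem.Chars.isspace (PySem.Chars.lstrip cs).reverse).reverse) [] [] := by
        rw [go_append_space _ _ hw]; rfl
    _ = PySem.Chars.split₀.go (PySem.Chars.lstrip cs) [] [] := by rw [← hu]
    _ = PySem.Chars.split₀.go cs [] [] := go_dropWhile cs []

-- per-token: A's dict lookup equals B's arithmetic decode, for EVERY token
lemma tok_eq (cs : List Char) :
    ((PySem.Dict.ofList baconPairs).getD (String.ofList cs) "?").toList = baconDecodeTok cs := by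
  by_cases h : cs.length = 5 ∧ cs.all (fun c => c = 'A' || c = 'B') = true
  · obtain ⟨h5, hab⟩ := h
    match cs, h5 with
    | [a, b, c, d, e], _ =>
      simp only [List.all_cons, List.all_nil, Bool.and_true, Bool.and_eq_true,
        Bool.or_eq_true, decide_eq_true_eq] at hab
      obtain ⟨(rfl | rfl), (rfl | rfl), (rfl | rfl), (rfl | rfl), (rfl | rfl)⟩ := hab <;> decide
  · have hnc : (PySem.Dict.ofList baconPairs).contains (String.ofList cs) = false := by
      rw [PySem.Dict.contains_eq_decide_mem_keys]
      simp only [decide_eq_false_iff_not]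
      intro hmem
      have hp : ∀ k ∈ (PySem.Dict.ofList baconPairs).keys,
          k.toList.length = 5 ∧ k.toList.all (fun c => c = 'A' || c = 'B') = true := by decide
      have hk := hp _ hmem
      rw [String.toList_ofList] at hk
      exact h hk
    rw [PySem.Dict.getD_of_not_contains _ _ hnc, baconDecodeTok, if_neg h]
    rfl

-- ===== VERDICT (by name: the statement is the Claim_ definition above) =====
theorem bacons_cipher_decrypt_spec : Claim_equal_bacons_cipher_decrypt := by
  intro ciphertext _
  unfold Spec_bacons_cipher_decrypt bacons_cipher_decrypt bacons_cipher_decrypt_alt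
  have hsplitA : PySem.Str.split₀ (PySem.Str.strip ciphertext) =
      (PySem.Chars.split₀ ciphertext.toList).map String.ofList := by
    rw [PySem.Str.split₀, PySem.Str.toList_strip, split₀_strip]
  have hsplitB : (PySem.Str.split₀ ciphertext).map String.toList =
      PySem.Chars.split₀ ciphertext.toList := by
    rw [PySem.Str.split₀, List.map_map]
    simp [Function.comp_def, String.toList_ofList]
  simp only [hsplitA, hsplitB, PySem.List.foldl_append_eq_flatMap, List.flatMap_map,
    tok_eq, List.nil_append]
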